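-- pv_equiv track=rewrite | github.com/VinayKhatrii/ArchivePythonApp | modules/modules.py | noOfPages
-- ===== SOURCE A (Python) =====
-- def noOfPages(hrefs, domain) -> int:
--
--     pages = 0
--
--     def condition(i, a, domain) -> bool:
--
--         conditionList = [f"/page/{i}", f"/page/{i}/", f"?page={i}/", f"?page={i}"]
--
--         cond = any(str(a['href']).endswith(suffix) and domain in str(a['href']) for suffix in conditionList)
--
--         return cond
--
--     for a in hrefs:
--         for i in range(2, 20):
--             try:
--                 pages = max(pages, i) if condition(i, a, domain) else pages
--                 if condition(i, a, domain):
--                     pages = max(pages, i)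
--
--             except Exception:
--                 continue
--
--     return pages
-- ===== SOURCE B (Python) =====
-- def noOfPages(hrefs, domain) -> int:
--     # One scan per href: parse the trailing "/page/N" / "?page=N" (optionally "/"-terminated)
--     # directly instead of testing 18 candidate suffixes per href.
--     pages = 0
--     for a in hrefs:
--         try:
--             s = str(a['href'])
--         except Exception:
--             continue
--         if domain not in s:
--             continue
--         # drop one trailing '/' so ".../page/7" and ".../page/7/" parse alike
--         t = s[:-1] if s.endswith('/') else s
--         # collect the trailing run of digits of t
--         k = len(t)
--         while k > 0 and '0' <= t[k - 1] <= '9':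
--             k -= 1
--         digits = t[k:]
--         # page numbers of interest are 2..19: one or two digits, no leading zero
--         if not digits or digits[0] == '0' or len(digits) > 2:
--             continue
--         n = int(digits)
--         if 2 <= n <= 19 and (t[:k].endswith('/page/') or t[:k].endswith('?page=')):
--             pages = max(pages, n)
--     return pages
-- ===== Notes on version B (the rewrite author's own statement) =====
-- stated objective: alternative
-- what changed: Instead of testing 18 page numbers x 4 literal suffixes per href, B parses each href once: strip one trailing '/', take the trailing digit run, and accept it as the page number if it has no leading zero, lies in 2..19 and is preceded by '/page/' or '?page='.
import Mathlib
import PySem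

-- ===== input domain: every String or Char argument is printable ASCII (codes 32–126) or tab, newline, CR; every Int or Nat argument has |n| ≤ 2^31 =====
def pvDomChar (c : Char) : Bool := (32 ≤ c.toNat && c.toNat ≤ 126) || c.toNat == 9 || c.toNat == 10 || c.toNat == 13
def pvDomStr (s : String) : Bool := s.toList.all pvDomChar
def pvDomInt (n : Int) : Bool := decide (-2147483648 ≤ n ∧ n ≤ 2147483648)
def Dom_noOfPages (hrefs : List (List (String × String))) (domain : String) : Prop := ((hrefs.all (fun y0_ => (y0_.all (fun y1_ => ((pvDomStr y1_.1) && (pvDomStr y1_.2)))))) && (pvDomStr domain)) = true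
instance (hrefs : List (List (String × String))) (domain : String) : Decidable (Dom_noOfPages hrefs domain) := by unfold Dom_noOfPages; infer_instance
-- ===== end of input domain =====

-- B replaces A's per-href scan over 18 page numbers × 4 literal suffixes by a single direct
-- parse of the trailing "/page/N" / "?page=N" (optionally '/'-terminated) form (alternative
-- algorithm, same cost).

-- ===== PORT A =====
-- noOfPages' inner helper condition(i, a, domain), with s = str(a['href']) already looked up
def pvCond (i : Int) (s domain : String) : Bool :=
  let conditionList := ["/page/".toList ++ PySem.Int.toChars i,
                        "/page/".toList ++ PySem.Int.toChars i ++ ['/'],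
                        "?page=".toList ++ PySem.Int.toChars i ++ ['/'],
                        "?page=".toList ++ PySem.Int.toChars i]
  conditionList.any (fun suffix => PySem.Chars.endswith s.toList suffix && PySem.Str.isIn domain s)


def noOfPages (hrefs : List (List (String × String))) (domain : String) : Int :=
  hrefs.foldl (fun pages a =>
    (PySem.List.pyRange 2 20 1).foldl (fun pages i =>
      match (PySem.Dict.mk a).get? "href" with
      | none => pages  -- a['href'] raises KeyError → except Exception: continue
      | some s =>
        let pages1 := if pvCond i s domain then max pages i else pages
        if pvCond i s domain then max pages1 i else pages1) pages) 0

-- ===== PORT B =====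
-- Source B's while loop pops trailing digits of t; popping the last character of t is consuming the
-- head of t.reverse, so the loop is this structural recursion on the reversed characters (exact),
-- and Source B's t[k:] / t[:k] are the two components (reversed back).
def pvIsDig (c : Char) : Bool := decide ('0' ≤ c) && decide (c ≤ '9')

def pvTrailSplit : List Char → List Char × List Char
  | [] => ([], [])
  | c :: r =>
    if pvIsDig c then
      let p := pvTrailSplit r
      (c :: p.1, p.2)
    else ([], c :: r)

def pvHrefPage (s domain : String) : Option Int :=
  if PySem.Str.isIn domain s then
    let cs := s.toList
    let t := if PySem.Chars.endswith cs ['/'] then PySem.List.slice cs none (some (-1)) else cs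
    let p := pvTrailSplit t.reverse
    let digits := p.1.reverse
    let rest := p.2.reverse
    match digits with
    | [] => none
    | d0 :: _ =>
      if d0 = '0' ∨ 2 < digits.length then none
      else
        match PySem.Int.ofChars? digits with
        | none => none
        | some n =>
          if (2 ≤ n ∧ n ≤ 19) ∧ (PySem.Chars.endswith rest ("/page/".toList) ∨ PySem.Chars.endswith rest ("?page=".toList))
          then some n else none
  else none

def noOfPages_alt (hrefs : List (List (String × String))) (domain : String) : Int :=
  hrefs.foldl (fun pages a =>
    match (PySem.Dict.mk a).get? "href" with
    | none => pages
    | some s =>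
      match pvHrefPage s domain with
      | none => pages
      | some n => max pages n) 0

-- ===== PRECONDITION & SPEC =====
def Spec_noOfPages (hrefs : List (List (String × String))) (domain : String) (out : Int) : Prop := out = noOfPages_alt hrefs domain
instance (hrefs : List (List (String × String))) (domain : String) (out : Int) : Decidable (Spec_noOfPages hrefs domain out) := by unfold Spec_noOfPages; infer_instance

-- ===== CLAIM (what is proved, stated in full; the proofs are below) =====
def Claim_equal_noOfPages : Prop := ∀ (hrefs : List (List (String × String))) (domain : String), Dom_noOfPages hrefs domain → Spec_noOfPages hrefs domain (noOfPages hrefs domain)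

-- ===== LEMMAS AND PROOFS =====

lemma pvTrailSplit_append (xs ys : List Char) (hx : ∀ c ∈ xs, pvIsDig c = true)
    (hy : ∀ c, ys.head? = some c → pvIsDig c = false) :
    pvTrailSplit (xs ++ ys) = (xs, ys) := by
  induction xs with
  | nil =>
    cases ys with
    | nil => rfl
    | cons c r => simp [pvTrailSplit, hy c rfl]
  | cons c r ih =>
    have hc : pvIsDig c = true := hx c (by simp)
    simp [pvTrailSplit, hc, ih (fun c hmem => hx c (by simp [hmem]))]

lemma pvTrailSplit_decomp (l : List Char) :
    l = (pvTrailSplit l).1 ++ (pvTrailSplit l).2 ∧ ∀ c ∈ (pvTrailSplit l).1, pvIsDig c = true := by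
  induction l with
  | nil => simp [pvTrailSplit]
  | cons c r ih =>
    by_cases hc : pvIsDig c = true
    · simp only [pvTrailSplit, hc, if_true]
      exact ⟨by rw [List.cons_append, ← ih.1], by
        intro x hx
        rcases List.mem_cons.mp hx with rfl | hx
        · exact hc
        · exact ih.2 x hx⟩
    · simp [pvTrailSplit, hc]

lemma pv_singleton_suffix (l : List Char) (c : Char) : [c] <:+ l ↔ l.getLast? = some c := by
  constructor
  · rintro ⟨u, rfl⟩; simp
  · intro h
    obtain ⟨l', rfl⟩ := List.getLast?_eq_some_iff.mp h
    exact ⟨l', rfl⟩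

lemma pv_core (s domain : String) (hin : PySem.Str.isIn domain s = true)
    (P w d : List Char) (i : Int)
    (hd_all : d.all pvIsDig = true) (hd_ne : d ≠ []) (hd0 : d.head? ≠ some '0')
    (hd_len : d.length ≤ 2) (hval : PySem.Int.ofChars? d = some i)
    (hi : 2 ≤ i ∧ i ≤ 19)
    (hPne : P ≠ []) (hPnd : ∀ c, P.getLast? = some c → pvIsDig c = false)
    (hPmatch : P = "/page/".toList ∨ P = "?page=".toList)
    (hcs : s.toList = w ++ P ++ d ∨ s.toList = w ++ P ++ d ++ ['/']) :
    pvHrefPage s domain = some i := by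
  have hts : pvTrailSplit ((w ++ P ++ d).reverse) = (d.reverse, P.reverse ++ w.reverse) := by
    have h1 : (w ++ P ++ d).reverse = d.reverse ++ (P.reverse ++ w.reverse) := by
      simp [List.reverse_append]
    rw [h1]
    apply pvTrailSplit_append
    · intro c hc
      exact List.all_eq_true.mp hd_all c (List.mem_reverse.mp hc)
    · intro c hc
      have hPr : P.reverse ≠ [] := by simpa using hPne
      rw [List.head?_append_of_ne_nil _ hPr, List.head?_reverse] at hc
      exact hPnd c hc
  have hslash : ∀ (t : List Char), t = w ++ P ++ d →
      ((match (pvTrailSplit t.reverse).1.reverse with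
        | [] => (none : Option Int)
        | d0 :: _ =>
          if d0 = '0' ∨ 2 < (pvTrailSplit t.reverse).1.reverse.length then none
          else
            match PySem.Int.ofChars? (pvTrailSplit t.reverse).1.reverse with
            | none => none
            | some n =>
              if (2 ≤ n ∧ n ≤ 19) ∧ (PySem.Chars.endswith (pvTrailSplit t.reverse).2.reverse ("/page/".toList) ∨ PySem.Chars.endswith (pvTrailSplit t.reverse).2.reverse ("?page=".toList))
              then some n else none) = some i) := by
    intro t ht
    subst ht
    rw [hts]
    simp only [List.reverse_reverse, List.reverse_append]
    cases d with
    | nil => exact absurd rfl hd_ne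
    | cons d0 dr =>
      have hd0' : d0 ≠ '0' := fun h => hd0 (by simp [h])
      have hnot : ¬(d0 = '0' ∨ 2 < (d0 :: dr).length) := by
        rintro (h | h)
        · exact hd0' h
        · simp only [List.length_cons] at h hd_len
          omega
      simp only [hval, if_neg hnot]
      rw [if_pos]
      refine ⟨hi, ?_⟩
      rcases hPmatch with rfl | rfl
      · exact Or.inl (by rw [PySem.Chars.endswith_iff]; exact List.suffix_append w _)
      · exact Or.inr (by rw [PySem.Chars.endswith_iff]; exact List.suffix_append w _)
  have hone : ∀ c ∈ d, pvIsDig c = true := List.all_eq_true.mp hd_all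
  rcases hcs with hcs | hcs
  · -- no trailing slash
    have hends : PySem.Chars.endswith s.toList ['/'] = false := by
      rw [Bool.eq_false_iff]
      intro htr
      have hsuf := (PySem.Chars.endswith_iff _ _).mp htr
      rw [pv_singleton_suffix, hcs] at hsuf
      rw [List.getLast?_append_of_ne_nil _ hd_ne] at hsuf
      exact absurd (hone _ (List.mem_of_getLast? hsuf)) (by decide)
    simp only [pvHrefPage, hin, if_true, hends, Bool.false_eq_true, if_false]
    exact hslash _ hcs
  · -- trailing slash
    have hcs' : s.toList = (w ++ P ++ d) ++ ['/'] := hcs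
    have hends : PySem.Chars.endswith s.toList ['/'] = true := by
      rw [PySem.Chars.endswith_iff, hcs']
      exact List.suffix_append _ _
    simp only [pvHrefPage, hin, if_true, hends]
    have hdrop : PySem.List.slice s.toList none (some (-1)) = w ++ P ++ d := by
      rw [PySem.List.slice_to_neg_one, hcs']
      exact List.dropLast_concat
    rw [hdrop]
    exact hslash _ rfl

lemma pv_toChars_facts (i : Int) (h2 : 2 ≤ i) (h20 : i < 20) :
    (PySem.Int.toChars i).all pvIsDig = true ∧
    (PySem.Int.toChars i).length ≤ 2 ∧
    (PySem.Int.toChars i).head? ≠ some '0' ∧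
    PySem.Int.toChars i ≠ [] ∧
    PySem.Int.ofChars? (PySem.Int.toChars i) = some i := by
  interval_cases i <;> exact ⟨by decide, by decide, by decide, by decide, by decide⟩

lemma pv_page_of_cond (i : Int) (s domain : String) (hi2 : 2 ≤ i) (hi20 : i < 20)
    (h : pvCond i s domain = true) : pvHrefPage s domain = some i := by
  obtain ⟨hall, hlen, hhd, hne, hof⟩ := pv_toChars_facts i hi2 hi20
  have hP1 : ("/page/".toList : List Char) ≠ [] := by decide
  have hP2 : ("?page=".toList : List Char) ≠ [] := by decide
  have hP1l : ∀ c, ("/page/".toList : List Char).getLast? = some c → pvIsDig c = false := by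
    intro c hc
    rw [show ("/page/".toList : List Char).getLast? = some '/' from rfl, Option.some.injEq] at hc
    rw [← hc]; decide
  have hP2l : ∀ c, ("?page=".toList : List Char).getLast? = some c → pvIsDig c = false := by
    intro c hc
    rw [show ("?page=".toList : List Char).getLast? = some '=' from rfl, Option.some.injEq] at hc
    rw [← hc]; decide
  simp only [pvCond, List.any_cons, List.any_nil, Bool.or_false, Bool.or_eq_true,
    Bool.and_eq_true, PySem.Chars.endswith_iff] at h
  rcases h with ⟨hsuf, hin⟩ | ⟨hsuf, hin⟩ | ⟨hsuf, hin⟩ | ⟨hsuf, hin⟩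
  · obtain ⟨w, hw⟩ := hsuf
    exact pv_core s domain hin _ w _ i hall hne hhd hlen hof ⟨hi2, by omega⟩ hP1 hP1l
      (Or.inl rfl) (Or.inl (by rw [← hw]; simp))
  · obtain ⟨w, hw⟩ := hsuf
    exact pv_core s domain hin _ w _ i hall hne hhd hlen hof ⟨hi2, by omega⟩ hP1 hP1l
      (Or.inl rfl) (Or.inr (by rw [← hw]; simp))
  · obtain ⟨w, hw⟩ := hsuf
    exact pv_core s domain hin _ w _ i hall hne hhd hlen hof ⟨hi2, by omega⟩ hP2 hP2l
      (Or.inr rfl) (Or.inr (by rw [← hw]; simp))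
  · obtain ⟨w, hw⟩ := hsuf
    exact pv_core s domain hin _ w _ i hall hne hhd hlen hof ⟨hi2, by omega⟩ hP2 hP2l
      (Or.inr rfl) (Or.inl (by rw [← hw]; simp))

lemma pv_digit_enum (c : Char) (h : pvIsDig c = true) :
    c ∈ ['0','1','2','3','4','5','6','7','8','9'] := by
  simp only [pvIsDig, Bool.and_eq_true, decide_eq_true_eq] at h
  obtain ⟨h1, h2⟩ := h
  obtain ⟨m, hm⟩ : ∃ m, c.toNat = m := ⟨_, rfl⟩
  have hc : c = Char.ofNat m := by rw [← hm]; exact (Char.ofNat_toNat c).symm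
  have hl : 48 ≤ m := by rw [← hm]; exact Nat.succ_le_of_lt h1
  have hr : m ≤ 57 := by rw [← hm]; exact h2
  subst hc
  interval_cases m <;> decide

lemma pv_parse1 (c : Char) (hc : c ∈ ['0','1','2','3','4','5','6','7','8','9']) (h0 : c ≠ '0')
    (n : Int) (hv : PySem.Int.ofChars? [c] = some n) (h2 : 2 ≤ n) (h19 : n ≤ 19) :
    [c] = PySem.Int.toChars n := by
  have hn : n = (PySem.Int.ofChars? [c]).getD 0 := by rw [hv]; rfl
  subst hn
  fin_cases hc <;>
    first
      | exact absurd rfl h0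
      | exact absurd h2 (by decide)
      | exact absurd h19 (by decide)
      | decide

lemma pv_parse2 (c d : Char) (hc : c ∈ ['0','1','2','3','4','5','6','7','8','9'])
    (hd : d ∈ ['0','1','2','3','4','5','6','7','8','9']) (h0 : c ≠ '0')
    (n : Int) (hv : PySem.Int.ofChars? [c, d] = some n) (h2 : 2 ≤ n) (h19 : n ≤ 19) :
    [c, d] = PySem.Int.toChars n := by
  have hn : n = (PySem.Int.ofChars? [c, d]).getD 0 := by rw [hv]; rfl
  subst hn
  fin_cases hc <;> fin_cases hd <;>
    first
      | exact absurd rfl h0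
      | exact absurd h2 (by decide)
      | exact absurd h19 (by decide)
      | decide

lemma pv_inner_inv (t : List Char) (n : Int)
    (h : (match (pvTrailSplit t.reverse).1.reverse with
        | [] => (none : Option Int)
        | d0 :: _ =>
          if d0 = '0' ∨ 2 < (pvTrailSplit t.reverse).1.reverse.length then none
          else
            match PySem.Int.ofChars? (pvTrailSplit t.reverse).1.reverse with
            | none => none
            | some m =>
              if (2 ≤ m ∧ m ≤ 19) ∧ (PySem.Chars.endswith (pvTrailSplit t.reverse).2.reverse ("/page/".toList) ∨ PySem.Chars.endswith (pvTrailSplit t.reverse).2.reverse ("?page=".toList))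
              then some m else none) = some n) :
    (2 ≤ n ∧ n ≤ 19) ∧
      ∃ u P, (P = "/page/".toList ∨ P = "?page=".toList) ∧ t = u ++ P ++ PySem.Int.toChars n := by
  obtain ⟨hdec, hdig⟩ := pvTrailSplit_decomp t.reverse
  cases hd : (pvTrailSplit t.reverse).1.reverse with
  | nil => rw [hd] at h; exact absurd h (by simp)
  | cons d0 dr =>
    rw [hd] at h
    by_cases h1 : d0 = '0' ∨ 2 < (d0 :: dr).length
    · simp only [if_pos h1] at h; exact absurd h (by simp)
    · simp only [if_neg h1] at h
      have hd0 : d0 ≠ '0' := fun hx => h1 (Or.inl hx)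
      have hlen : (d0 :: dr).length ≤ 2 := by
        by_contra hx
        exact h1 (Or.inr (by omega))
      cases hov : PySem.Int.ofChars? (d0 :: dr) with
      | none => rw [hov] at h; exact absurd h (by simp)
      | some m =>
        rw [hov] at h
        rw [show (match some m with
            | none => (none : Option Int)
            | some m =>
              if (2 ≤ m ∧ m ≤ 19) ∧ (PySem.Chars.endswith (pvTrailSplit t.reverse).2.reverse ("/page/".toList) ∨ PySem.Chars.endswith (pvTrailSplit t.reverse).2.reverse ("?page=".toList))
              then some m else none) =
            (if (2 ≤ m ∧ m ≤ 19) ∧ (PySem.Chars.endswith (pvTrailSplit t.reverse).2.reverse ("/page/".toList) ∨ PySem.Chars.endswith (pvTrailSplit t.reverse).2.reverse ("?page=".toList))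
              then some m else none) from rfl] at h
        by_cases h2 : (2 ≤ m ∧ m ≤ 19) ∧
            (PySem.Chars.endswith (pvTrailSplit t.reverse).2.reverse ("/page/".toList) = true ∨
             PySem.Chars.endswith (pvTrailSplit t.reverse).2.reverse ("?page=".toList) = true)
        · rw [if_pos h2] at h
          have hm : m = n := by
            have := h
            simpa using this
          subst hm
          have hall : ∀ c ∈ (d0 :: dr), pvIsDig c = true := by
            intro c hc
            apply hdig
            rw [← List.mem_reverse, hd]
            exact hc
          have htc : (d0 :: dr) = PySem.Int.toChars m := by
            match dr, hlen with
            | [], _ =>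
              exact pv_parse1 d0 (pv_digit_enum _ (hall d0 (by simp))) hd0 m hov h2.1.1 h2.1.2
            | [d1], _ =>
              exact pv_parse2 d0 d1 (pv_digit_enum _ (hall d0 (by simp)))
                (pv_digit_enum _ (hall d1 (by simp))) hd0 m hov h2.1.1 h2.1.2
            | d1 :: d2 :: rest, hlen => simp at hlen
          have ht : t = (pvTrailSplit t.reverse).2.reverse ++ (d0 :: dr) := by
            have hrev := congrArg List.reverse hdec
            rw [List.reverse_reverse, List.reverse_append, hd] at hrev
            exact hrev
          rcases h2.2 with hew | hew
          · obtain ⟨u, hu⟩ := (PySem.Chars.endswith_iff _ _).mp hew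
            exact ⟨h2.1, u, _, Or.inl rfl, by rw [ht, ← hu, htc]⟩
          · obtain ⟨u, hu⟩ := (PySem.Chars.endswith_iff _ _).mp hew
            exact ⟨h2.1, u, _, Or.inr rfl, by rw [ht, ← hu, htc]⟩
        · rw [if_neg h2] at h; exact absurd h (by simp)

lemma pv_cond_of_page (n : Int) (s domain : String) (h : pvHrefPage s domain = some n) :
    (2 ≤ n ∧ n ≤ 19) ∧ pvCond n s domain = true := by
  by_cases hin : PySem.Str.isIn domain s = true
  · by_cases hsl : PySem.Chars.endswith s.toList ['/'] = true
    · simp only [pvHrefPage, hin, if_true] at h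
      rw [if_pos hsl] at h
      obtain ⟨hb, u, P, hPm, ht⟩ := pv_inner_inv _ n h
      obtain ⟨v, hv⟩ := (PySem.Chars.endswith_iff _ _).mp hsl
      have hT : PySem.List.slice s.toList none (some (-1)) = v := by
        rw [PySem.List.slice_to_neg_one, ← hv]
        exact List.dropLast_concat
      rw [hT] at ht
      have hs : s.toList = u ++ P ++ PySem.Int.toChars n ++ ['/'] := by rw [← hv, ht]
      refine ⟨hb, ?_⟩
      simp only [pvCond, List.any_cons, List.any_nil, Bool.or_false, Bool.or_eq_true,
        Bool.and_eq_true, PySem.Chars.endswith_iff]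
      rcases hPm with rfl | rfl
      · exact Or.inr (Or.inl ⟨⟨u, by rw [hs]; simp⟩, hin⟩)
      · exact Or.inr (Or.inr (Or.inl ⟨⟨u, by rw [hs]; simp⟩, hin⟩))
    · simp only [pvHrefPage, hin, if_true] at h
      rw [if_neg hsl] at h
      obtain ⟨hb, u, P, hPm, ht⟩ := pv_inner_inv _ n h
      refine ⟨hb, ?_⟩
      simp only [pvCond, List.any_cons, List.any_nil, Bool.or_false, Bool.or_eq_true,
        Bool.and_eq_true, PySem.Chars.endswith_iff]
      rcases hPm with rfl | rfl
      · exact Or.inl ⟨⟨u, by rw [ht]; simp⟩, hin⟩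
      · exact Or.inr (Or.inr (Or.inr ⟨⟨u, by rw [ht]; simp⟩, hin⟩))
  · rw [pvHrefPage.eq_def, if_neg hin] at h
    exact absurd h (by simp)

lemma pv_fold_id_of_not_mem (l : List Int) (n : Int) (h : n ∉ l) (p : Int) :
    l.foldl (fun p i => if i = n then max p i else p) p = p := by
  induction l generalizing p with
  | nil => rfl
  | cons a l ih =>
    have ha : a ≠ n := fun hx => h (hx ▸ List.mem_cons_self ..)
    simp only [List.foldl_cons, if_neg ha]
    exact ih (fun hx => h (List.mem_cons_of_mem _ hx)) p

lemma pv_fold_max_of_mem (l : List Int) (n : Int) (h : n ∈ l) (p : Int) :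
    l.foldl (fun p i => if i = n then max p i else p) p = max p n := by
  induction l generalizing p with
  | nil => cases h
  | cons a l ih =>
    by_cases ha : a = n
    · subst ha
      rw [List.foldl_cons, if_pos rfl]
      by_cases hn : a ∈ l
      · rw [ih hn, max_assoc, max_self]
      · exact pv_fold_id_of_not_mem l a hn _
    · rw [List.foldl_cons, if_neg ha]
      exact ih ((List.mem_cons.mp h).resolve_left (fun hx => ha hx.symm)) p

lemma pv_href_step (domain : String) (a : List (String × String)) (p : Int) :
    (PySem.List.pyRange 2 20 1).foldl (fun pages i =>
      match (PySem.Dict.mk a).get? "href" with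
      | none => pages
      | some s =>
        let pages1 := if pvCond i s domain then max pages i else pages
        if pvCond i s domain then max pages1 i else pages1) p
    = match (PySem.Dict.mk a).get? "href" with
      | none => p
      | some s =>
        match pvHrefPage s domain with
        | none => p
        | some n => max p n := by
  cases hg : (PySem.Dict.mk a).get? "href" with
  | none =>
    simp only []
    exact PySem.List.foldl_ignore _ _
  | some s =>
    simp only []
    cases hp : pvHrefPage s domain with
    | none =>
      rw [PySem.List.foldl_congr_mem (g := fun (pages : Int) (_ : Int) => pages)]
      · exact PySem.List.foldl_ignore _ _
      · intro acc i hi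
        have hc : pvCond i s domain = false := by
          rw [Bool.eq_false_iff]
          intro hc
          obtain ⟨h2, h20⟩ := PySem.List.mem_pyRange_one.mp hi
          rw [pv_page_of_cond i s domain h2 h20 hc] at hp
          exact absurd hp (by simp)
        simp [hc]
    | some m =>
      have hcm := pv_cond_of_page m s domain hp
      rw [PySem.List.foldl_congr_mem (g := fun (pages i : Int) => if i = m then max pages i else pages)]
      · rw [pv_fold_max_of_mem]
        exact PySem.List.mem_pyRange_one.mpr ⟨hcm.1.1, by omega⟩
      · intro acc i hi
        obtain ⟨h2, h20⟩ := PySem.List.mem_pyRange_one.mp hi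
        by_cases hc : pvCond i s domain = true
        · have him : m = i := by
            have h3 := pv_page_of_cond i s domain h2 h20 hc
            rw [hp] at h3
            simpa using h3
          subst him
          simp [hc]
        · have hne : i ≠ m := by
            rintro rfl
            exact hc hcm.2
          rw [Bool.not_eq_true] at hc
          simp [hc, hne]

-- ===== VERDICT (by name: the statement is the Claim_ definition above) =====
theorem noOfPages_spec : Claim_equal_noOfPages := by
  intro hrefs domain _
  unfold Spec_noOfPages noOfPages noOfPages_alt
  apply PySem.List.foldl_congr_mem
  intro acc a _
  exact pv_href_step domain a acc
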